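-- pv_equiv track=rewrite | github.com/aotoyae/problem-solving | python/programmers/level.1/prgm_140108_1.py | solution
-- ===== SOURCE A (Python) =====
-- def solution(s):
--     x = ""
--     x_count = 0
--     y_count = 0
--     answer = 0
--
--     for char in s:
--         if not x: x = char
--         if x == char: x_count += 1
--         else: y_count += 1
--
--         if x_count == y_count:
--             answer += 1
--             x_count, y_count, x = 0, 0, ""
--
--     if x: answer += 1
--
--     return answer
-- ===== SOURCE B (Python) =====
-- def solution(s):
--     # Every completed group has an equal number of pivot / non-pivot characters,
--     # so every group boundary lies at an even index: the string can be consumed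
--     # two characters at a time, keeping only HALF the balance of the open group.
--     n = len(s)
--     answer = 0
--     pivot = None
--     half = 0
--     for k in range(0, n - 1, 2):
--         a, b = s[k], s[k + 1]
--         if pivot is None:
--             pivot = a
--             half = 1 if b == a else 0
--         else:
--             half += (a == pivot) + (b == pivot) - 1
--         if half == 0:
--             answer += 1
--             pivot = None
--     if n % 2 == 1 or pivot is not None:
--         answer += 1
--     return answer
-- ===== Notes on version B (the rewrite author's own statement) =====
-- stated objective: alternative
-- what changed: B consumes the string two characters per step (stride-2) keeping only half the signed balance of the open group, exploiting the invariant that every completed group has even length so group boundaries lie at even indices; A walks char by char with a pivot string and two counters.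
import Mathlib
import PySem

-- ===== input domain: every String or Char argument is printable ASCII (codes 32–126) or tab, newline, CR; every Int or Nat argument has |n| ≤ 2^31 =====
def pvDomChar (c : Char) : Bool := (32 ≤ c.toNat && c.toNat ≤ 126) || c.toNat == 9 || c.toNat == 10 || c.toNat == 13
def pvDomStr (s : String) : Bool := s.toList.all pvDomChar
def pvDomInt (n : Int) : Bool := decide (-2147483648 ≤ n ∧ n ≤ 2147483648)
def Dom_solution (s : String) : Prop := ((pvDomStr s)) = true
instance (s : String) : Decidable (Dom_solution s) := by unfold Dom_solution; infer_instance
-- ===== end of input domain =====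

-- B consumes the string two characters per step, keeping only half the balance of the
-- open group (group boundaries lie at even indices); same cost, different algorithmic state.

-- ===== PORT A =====
-- state = (x, x_count, y_count, answer); x = "" is modelled as none, x = one char as some
def solutionStep (st : Option Char × Int × Int × Int) (char : Char) :
    Option Char × Int × Int × Int :=
  let x := match st.1 with | none => char | some c => c   -- if not x: x = char
  let xc := if x == char then st.2.1 + 1 else st.2.1
  let yc := if x == char then st.2.2.1 else st.2.2.1 + 1
  if xc == yc then (none, 0, 0, st.2.2.2 + 1) else (some x, xc, yc, st.2.2.2)

def solution (s : String) : Int :=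
  let st := s.toList.foldl solutionStep (none, 0, 0, 0)
  if st.1.isSome then st.2.2.2 + 1 else st.2.2.2   -- if x: answer += 1

-- ===== PORT B =====
-- the stride-2 loop of Source B: two characters per step; the [] / [c] cases are the tail check
def altGo : Option Char → Int → Int → List Char → Int
  | pivot, _, ans, [] => if pivot.isSome then ans + 1 else ans
  | _, _, ans, [_] => ans + 1
  | pivot, half, ans, a :: b :: rest =>
      let p := match pivot with | none => a | some p => p
      let h' := match pivot with
        | none => if b == a then (1 : Int) else 0
        | some p => half + (if a == p then 1 else 0) + (if b == p then 1 else 0) - 1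
      if h' = 0 then altGo none 0 (ans + 1) rest
      else altGo (some p) h' ans rest
termination_by _ _ _ xs => xs.length

def solution_alt (s : String) : Int := altGo none 0 0 s.toList

-- ===== PRECONDITION & SPEC =====
def Spec_solution (s : String) (out : Int) : Prop := out = solution_alt s
instance (s : String) (out : Int) : Decidable (Spec_solution s out) := by unfold Spec_solution; infer_instance

-- ===== CLAIM (what is proved, stated in full; the proofs are below) =====
def Claim_equal_solution : Prop := ∀ (s : String), Dom_solution s → Spec_solution s (solution s)

-- ===== LEMMAS AND PROOFS =====

def pvFinish (st : Option Char × Int × Int × Int) : Int :=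
  if st.1.isSome then st.2.2.2 + 1 else st.2.2.2

-- main invariant: A's two-counter state relates to B's half-balance by xc - yc = 2*half
theorem solution_loop (xs : List Char) :
    (∀ ans : Int, pvFinish (xs.foldl solutionStep (none, 0, 0, ans)) = altGo none 0 ans xs) ∧
    (∀ (f : Char) (xc yc ans half : Int), 1 ≤ half → xc - yc = 2 * half →
      pvFinish (xs.foldl solutionStep (some f, xc, yc, ans)) = altGo (some f) half ans xs) := by
  match xs with
  | [] =>
    constructor
    · intro ans; simp [pvFinish, altGo]
    · intro f xc yc ans half h1 h2; simp [pvFinish, altGo]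
  | [c] =>
    constructor
    · intro ans
      have hstep : solutionStep (none, 0, 0, ans) c = (some c, 1, 0, ans) := by
        simp [solutionStep]
      simp [hstep, pvFinish, altGo]
    · intro f xc yc ans half h1 h2
      by_cases hc : f == c
      · have hne : ((xc + 1 : Int) == yc) = false := by simp; omega
        simp [solutionStep, hc, hne, pvFinish, altGo]
      · have hc' : (f == c) = false := by simp_all
        have hne : ((xc : Int) == yc + 1) = false := by simp; omega
        simp [solutionStep, hc', hne, pvFinish, altGo]
  | a :: b :: rest =>
    have ih := solution_loop rest
    constructor
    · intro ans
      have hstep1 : solutionStep (none, 0, 0, ans) a = (some a, 1, 0, ans) := by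
        simp [solutionStep]
      rw [List.foldl_cons, hstep1, List.foldl_cons]
      by_cases hab : a == b
      · -- second char matches the pivot: counters 2/0, half-balance 1
        have hba : b == a := by simp_all
        have hne : ((2 : Int) == 0) = false := by decide
        have hstep2 : solutionStep (some a, 1, 0, ans) b = (some a, 2, 0, ans) := by
          simp [solutionStep, hab, hne]
        rw [hstep2]
        rw [ih.2 a 2 0 ans 1 (by omega) (by ring)]
        simp [altGo, hba]
      · -- second char differs: the pair closes a group immediately
        have hab' : (a == b) = false := by simp_all
        have hba : (b == a) = false := by simp_all [ne_comm]
        have hstep2 : solutionStep (some a, 1, 0, ans) b = (none, 0, 0, ans + 1) := by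
          simp [solutionStep, hab']
        rw [hstep2, ih.1 (ans + 1)]
        simp [altGo, hba]
    · intro f xc yc ans half h1 h2
      rw [List.foldl_cons]
      have ea : (if f == a then (1 : Int) else 0) = (if a == f then 1 else 0) := by
        by_cases h : a == f <;> simp_all [BEq.comm]
      have eb : (if f == b then (1 : Int) else 0) = (if b == f then 1 else 0) := by
        by_cases h : b == f <;> simp_all [BEq.comm]
      -- step on a: counters shift by ±1, difference becomes odd hence nonzero
      by_cases ha : f == a
      · have hne : ((xc + 1 : Int) == yc) = false := by simp; omega
        have hstep1 : solutionStep (some f, xc, yc, ans) a = (some f, xc + 1, yc, ans) := by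
          simp [solutionStep, ha, hne]
        rw [hstep1, List.foldl_cons]
        by_cases hb : f == b
        · have hne2 : ((xc + 2 : Int) == yc) = false := by simp; omega
          have hstep2 : solutionStep (some f, xc + 1, yc, ans) b = (some f, xc + 2, yc, ans) := by
            have : xc + 1 + 1 = xc + 2 := by ring
            simp [solutionStep, hb, hne2, this]
          rw [hstep2]
          rw [ih.2 f (xc + 2) yc ans (half + 1) (by omega) (by omega)]
          have hz : half + (if a == f then (1:Int) else 0) + (if b == f then 1 else 0) - 1 = half + 1 := by
            rw [← ea, ← eb]; simp [ha, hb]; try ring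
          have hnz : half + 1 ≠ 0 := by omega
          simp only [altGo, hz]
          simp [hnz]
        · have hb' : (f == b) = false := by simp_all
          by_cases hz1 : xc + 1 = yc + 1
          · -- balance was 2 (half = 1) and the mixed pair closes the group
            have heq : ((xc + 1 : Int) == yc + 1) = true := by simp; omega
            have hstep2 : solutionStep (some f, xc + 1, yc, ans) b = (none, 0, 0, ans + 1) := by
              simp [solutionStep, hb', heq]
            rw [hstep2, ih.1 (ans + 1)]
            have hhalf : half = 1 := by omega
            have hz : half + (if a == f then (1:Int) else 0) + (if b == f then 1 else 0) - 1 = 0 := by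
              rw [← ea, ← eb]; simp [ha, hb']; try omega
            simp only [altGo, hz]
            simp
          · have hne2 : ((xc + 1 : Int) == yc + 1) = false := by simp; omega
            have hstep2 : solutionStep (some f, xc + 1, yc, ans) b = (some f, xc + 1, yc + 1, ans) := by
              simp [solutionStep, hb', hne2]
            rw [hstep2]
            rw [ih.2 f (xc + 1) (yc + 1) ans half (by omega) (by omega)]
            have hz : half + (if a == f then (1:Int) else 0) + (if b == f then 1 else 0) - 1 = half := by
              rw [← ea, ← eb]; simp [ha, hb']; try ring
            have hnz : half ≠ 0 := by omega
            simp only [altGo, hz]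
            simp [hnz]
      · have ha' : (f == a) = false := by simp_all
        by_cases hz1 : (xc : Int) = yc + 1
        · -- half = 1 would have closed already at a? no: xc - yc = 2*half even, xc = yc+1 impossible
          exfalso; omega
        · have hne : ((xc : Int) == yc + 1) = false := by simp; omega
          have hstep1 : solutionStep (some f, xc, yc, ans) a = (some f, xc, yc + 1, ans) := by
            simp [solutionStep, ha', hne]
          rw [hstep1, List.foldl_cons]
          by_cases hb : f == b
          · have hne2 : ((xc + 1 : Int) == yc + 1) = false := by simp; omega
            have hstep2 : solutionStep (some f, xc, yc + 1, ans) b = (some f, xc + 1, yc + 1, ans) := by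
              simp [solutionStep, hb, hne2]
            rw [hstep2]
            rw [ih.2 f (xc + 1) (yc + 1) ans half (by omega) (by omega)]
            have hz : half + (if a == f then (1:Int) else 0) + (if b == f then 1 else 0) - 1 = half := by
              rw [← ea, ← eb]; simp [ha', hb]; try ring
            have hnz : half ≠ 0 := by omega
            simp only [altGo, hz]
            simp [hnz]
          · have hb' : (f == b) = false := by simp_all
            by_cases hz2 : (xc : Int) = yc + 2
            · have heq : ((xc : Int) == yc + 1 + 1) = true := by simp; omega
              have hstep2 : solutionStep (some f, xc, yc + 1, ans) b = (none, 0, 0, ans + 1) := by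
                simp [solutionStep, hb', heq]
              rw [hstep2, ih.1 (ans + 1)]
              have hz : half + (if a == f then (1:Int) else 0) + (if b == f then 1 else 0) - 1 = 0 := by
                rw [← ea, ← eb]; simp [ha', hb']; try omega
              simp only [altGo, hz]
              simp
            · have hne2 : ((xc : Int) == yc + 1 + 1) = false := by simp; omega
              have hstep2 : solutionStep (some f, xc, yc + 1, ans) b = (some f, xc, yc + 2, ans) := by
                have : yc + 1 + 1 = yc + 2 := by ring
                simp [solutionStep, hb', this]
                omega
              rw [hstep2]
              rw [ih.2 f xc (yc + 2) ans (half - 1) (by omega) (by omega)]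
              have hz : half + (if a == f then (1:Int) else 0) + (if b == f then 1 else 0) - 1 = half - 1 := by
                rw [← ea, ← eb]; simp [ha', hb']; try ring
              have hnz : half - 1 ≠ 0 := by omega
              simp only [altGo, hz]
              simp [hnz]
termination_by xs.length

-- ===== VERDICT (by name: the statement is the Claim_ definition above) =====
theorem solution_spec : Claim_equal_solution := by
  intro s _
  show solution s = solution_alt s
  have := (solution_loop s.toList).1 0
  simpa [solution, solution_alt, pvFinish] using this
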